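-- pv_equiv track=rewrite | github.com/rajlath/rkl_codes | code-signal/alphabet_sequence.py | alphabetSubsequence
-- ===== SOURCE A (Python) =====
-- def alphabetSubsequence(s):
--     a="abcdefghijklmnopqrstuvwxyz"
--     i=0
--     j=0
--     while i<len(s) and j<len(a):
--         if a[j] == s[i]:
--             i += 1
--             j += 1
--         else:
--             j += 1
--     return i == len(s)
-- ===== SOURCE B (Python) =====
-- def alphabetSubsequence(s):
--     letters = set("abcdefghijklmnopqrstuvwxyz")
--     return all(c in letters for c in s) and all(x < y for x, y in zip(s, s[1:]))
-- ===== Notes on version B (the rewrite author's own statement) =====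
-- stated objective: idiomatic
-- what changed: Replaced A's greedy two-pointer scan of the alphabet string by a direct predicate: every character is in the lowercase-letter set and adjacent characters are strictly increasing.
import Mathlib
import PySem

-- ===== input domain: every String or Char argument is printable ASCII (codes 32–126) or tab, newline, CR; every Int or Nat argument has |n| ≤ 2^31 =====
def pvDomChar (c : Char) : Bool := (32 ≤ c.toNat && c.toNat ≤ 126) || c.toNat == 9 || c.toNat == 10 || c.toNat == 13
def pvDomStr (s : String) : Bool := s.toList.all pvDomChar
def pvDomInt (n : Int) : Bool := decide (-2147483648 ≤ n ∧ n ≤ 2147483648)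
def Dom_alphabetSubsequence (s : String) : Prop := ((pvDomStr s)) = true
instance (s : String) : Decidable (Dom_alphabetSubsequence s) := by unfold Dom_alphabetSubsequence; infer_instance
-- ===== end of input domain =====

-- B replaces A's two-pointer greedy scan of the alphabet by a direct check
-- (all chars in the lowercase set, adjacent pairs strictly increasing); objective: idiomatic.

-- ===== PORT A =====
-- A's while loop advances pointer i into s and pointer j into the alphabet;
-- we transliterate the two index pointers as the two remaining suffixes.
def pvGoA : List Char → List Char → Bool
  | [], _ => true                      -- i == len(s): loop exits with i == len(s) → True
  | _ :: _, [] => false                -- j == len(a) but i < len(s) → False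
  | c :: cs, x :: xs =>
    if x == c then pvGoA cs xs         -- a[j] == s[i]: i += 1; j += 1
    else pvGoA (c :: cs) xs            -- else: j += 1

def alphabetSubsequence (s : String) : Bool :=
  pvGoA s.toList "abcdefghijklmnopqrstuvwxyz".toList

-- ===== PORT B =====
def pvLetters : PySem.Set Char := PySem.Set.ofList "abcdefghijklmnopqrstuvwxyz".toList

def alphabetSubsequence_alt (s : String) : Bool :=
  (s.toList.all (fun c => PySem.Set.contains pvLetters c)) &&
  ((s.toList.zip (PySem.List.slice s.toList (some 1) none)).all (fun p => decide (p.1 < p.2)))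

-- ===== PRECONDITION & SPEC =====
def Spec_alphabetSubsequence (s : String) (out : Bool) : Prop := out = alphabetSubsequence_alt s
instance (s : String) (out : Bool) : Decidable (Spec_alphabetSubsequence s out) := by unfold Spec_alphabetSubsequence; infer_instance

-- ===== CLAIM (what is proved, stated in full; the proofs are below) =====
def Claim_equal_alphabetSubsequence : Prop := ∀ (s : String), Dom_alphabetSubsequence s → Spec_alphabetSubsequence s (alphabetSubsequence s)

-- ===== LEMMAS AND PROOFS =====

-- strictly-increasing check in head-recursive form, used to characterise both ports
def pvIncr : List Char → Bool
  | c :: d :: rest => decide (c < d) && pvIncr (d :: rest)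
  | _ => true

theorem pvIncr_head_lt : ∀ (cs : List Char) (c : Char), pvIncr (c :: cs) = true → ∀ e ∈ cs, c < e := by
  intro cs
  induction cs with
  | nil => intro c _ e he; cases he
  | cons d ds ih =>
    intro c h e he
    simp only [pvIncr, Bool.and_eq_true, decide_eq_true_eq] at h
    rcases List.mem_cons.mp he with he | he
    · exact he ▸ h.1
    · exact lt_trans h.1 (ih d h.2 e he)

theorem pv_all_mem_cons (x : Char) (xs l : List Char) (h : ∀ e ∈ l, e ≠ x) :
    l.all (fun c => decide (c ∈ x :: xs)) = l.all (fun c => decide (c ∈ xs)) := by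
  induction l with
  | nil => rfl
  | cons a as ih =>
    simp only [List.all_cons]
    rw [ih (fun e he => h e (List.mem_cons_of_mem a he))]
    have hax : a ≠ x := h a (List.mem_cons_self ..)
    simp [List.mem_cons, hax]

theorem pvGoA_char : ∀ (al : List Char), List.Pairwise (· < ·) al → ∀ sl : List Char,
    pvGoA sl al = (sl.all (fun c => decide (c ∈ al)) && pvIncr sl) := by
  intro al
  induction al with
  | nil =>
    intro _ sl
    cases sl with
    | nil => rfl
    | cons c cs => simp [pvGoA]
  | cons x xs ih =>
    intro hp sl
    have hx : ∀ y ∈ xs, x < y := fun y hy => (List.pairwise_cons.mp hp).1 y hy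
    have hpxs : List.Pairwise (· < ·) xs := (List.pairwise_cons.mp hp).2
    cases sl with
    | nil => rfl
    | cons c cs =>
      by_cases hxc : x = c
      · subst hxc
        simp only [pvGoA, beq_self_eq_true, if_true, ih hpxs]
        cases cs with
        | nil => simp [pvIncr]
        | cons d ds =>
          by_cases hcd : x < d
          · by_cases hic : pvIncr (d :: ds) = true
            · have hne : ∀ e ∈ d :: ds, e ≠ x := by
                intro e he
                rcases List.mem_cons.mp he with he | he
                · exact he ▸ ne_of_gt hcd
                · exact ne_of_gt (lt_trans hcd (pvIncr_head_lt ds d hic e he))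
              have hall := pv_all_mem_cons x xs (d :: ds) hne
              simp only [List.all_cons] at hall
              simp only [List.all_cons, pvIncr, hall]
              simp [hcd, hic]
            · simp only [Bool.not_eq_true] at hic
              simp [pvIncr, hic, hcd]
          · have hd : (decide (d ∈ xs)) = false := by
              simp only [decide_eq_false_iff_not]
              intro hmem
              exact hcd (lt_of_not_ge (fun hge => (not_lt.mpr hge).elim (hx d hmem)))
            simp [pvIncr, hcd, List.all_cons, hd]
      · have hbeq : (x == c) = false := by simp [hxc]
        simp only [pvGoA, hbeq, Bool.false_eq_true, if_false, ih hpxs]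
        by_cases hcx : c ∈ xs
        · by_cases hic : pvIncr (c :: cs) = true
          · have hne : ∀ e ∈ c :: cs, e ≠ x := by
              intro e he
              rcases List.mem_cons.mp he with he | he
              · exact he ▸ fun h' => hxc h'.symm
              · exact ne_of_gt (lt_trans (hx c hcx) (pvIncr_head_lt cs c hic e he))
            rw [pv_all_mem_cons x xs (c :: cs) hne]
          · simp only [Bool.not_eq_true] at hic
            simp [hic]
        · have hcx2 : c ≠ x := fun h' => hxc h'.symm
          simp [List.all_cons, hcx, hcx2]

theorem pv_zip_eq_incr : ∀ sl : List Char,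
    ((sl.zip sl.tail).all (fun p => decide (p.1 < p.2))) = pvIncr sl := by
  intro sl
  induction sl with
  | nil => rfl
  | cons c cs ih =>
    cases cs with
    | nil => rfl
    | cons d ds => simp [pvIncr, ← ih]

theorem pv_contains_letters (c : Char) :
    PySem.Set.contains pvLetters c = decide (c ∈ "abcdefghijklmnopqrstuvwxyz".toList) := by
  have h : pvLetters = "abcdefghijklmnopqrstuvwxyz".toList := by decide
  rw [h]
  simp [PySem.Set.contains_eq_listContains]

-- ===== VERDICT (by name: the statement is the Claim_ definition above) =====
theorem alphabetSubsequence_spec : Claim_equal_alphabetSubsequence := by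
  intro s _
  unfold Spec_alphabetSubsequence alphabetSubsequence alphabetSubsequence_alt
  have hpair : List.Pairwise (· < ·) "abcdefghijklmnopqrstuvwxyz".toList := by decide
  rw [pvGoA_char _ hpair s.toList]
  have hsl : PySem.List.slice s.toList (some 1) none = s.toList.tail := by
    have := PySem.List.slice_from_natCast (xs := s.toList) (a := 1)
    simpa [List.drop_one] using this
  rw [hsl, pv_zip_eq_incr]
  simp only [pv_contains_letters]
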